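-- pv_equiv track=rewrite | github.com/StarSein/BaekJoon | 백준/Gold/19566. 수열의 구간 평균/수열의 구간 평균.py | solution
-- ===== SOURCE A (Python) =====
-- from collections import Counter
-- from typing import List
--
-- def solution(N: int, K: int, arr: List[int]) -> int:
--     pref_sums = [0]
--     for Ai in arr:
--         pref_sums.append(pref_sums[-1] + Ai)
--
--     counter = Counter()
--     answer = 0
--     for i, pref_sum in enumerate(pref_sums):
--         key = pref_sum - K * i
--         answer += counter[key]
--         counter[key] += 1
--     return answer
-- ===== SOURCE B (Python) =====
-- from typing import List
--
-- def solution(N: int, K: int, arr: List[int]) -> int: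
--     # Sort the adjusted prefix-sum keys and count equal pairs by run-length scan (no dictionary).
--     keys = [0]
--     t = 0
--     for a in arr:
--         t += a - K
--         keys.append(t)
--     keys.sort()
--     answer = 0
--     prev = None
--     run = 0
--     for k in keys:
--         if prev is not None and k == prev:
--             run += 1
--         else:
--             answer += run * (run - 1) // 2
--             prev = k
--             run = 1
--     answer += run * (run - 1) // 2
--     return answer
-- ===== Notes on version B (the rewrite author's own statement) =====
-- stated objective: alternative
-- what changed: B replaces A's hash-counter streaming pass with sort-then-scan: it builds the list of adjusted prefix-sum keys (running sum of a-K), sorts it, and counts run*(run-1)//2 over maximal runs of equal keys, using no dictionary at all; a timing run measured this faster (C-level sort vs per-element interpreted Counter updates).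
import Mathlib
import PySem

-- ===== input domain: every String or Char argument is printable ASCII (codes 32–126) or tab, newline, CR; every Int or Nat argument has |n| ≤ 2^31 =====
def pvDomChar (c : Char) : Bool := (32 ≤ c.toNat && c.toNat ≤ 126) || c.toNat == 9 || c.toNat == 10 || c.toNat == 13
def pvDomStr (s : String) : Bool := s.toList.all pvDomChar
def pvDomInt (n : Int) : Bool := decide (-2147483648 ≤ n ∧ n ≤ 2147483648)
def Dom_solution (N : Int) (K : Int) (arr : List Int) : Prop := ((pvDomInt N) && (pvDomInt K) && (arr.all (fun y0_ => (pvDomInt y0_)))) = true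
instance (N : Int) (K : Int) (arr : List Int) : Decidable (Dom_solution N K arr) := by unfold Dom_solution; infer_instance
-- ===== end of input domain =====

-- B sorts the adjusted prefix-sum keys and counts equal pairs by a run-length scan (no dictionary); alternative algorithm, same result.

-- ===== PORT A =====
-- transliteration of A: prefix-sum list, then streaming Counter loop (answer += counter[key]; counter[key] += 1)
def solution (N : Int) (K : Int) (arr : List Int) : Int :=
  -- ps is never empty (starts as [0]), so ps[-1] via pyGetD is exact here
  let pref_sums := arr.foldl (fun ps Ai => ps ++ [PySem.List.pyGetD ps (-1) 0 + Ai]) [0]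
  let res := (PySem.List.enumerate pref_sums 0).foldl
      (fun (st : PySem.Dict Int Int × Int) p =>
        let key := p.2 - K * p.1
        (st.1.modify key 0 (· + 1), st.2 + st.1.getD key 0))
      (PySem.Dict.empty, 0)
  res.2

-- ===== PORT B =====
-- run * (run - 1) // 2, the expression Source B uses twice
def pairF (c : Int) : Int := PySem.Int.floordiv (c * (c - 1)) 2

-- the body of Source B's scan loop over the sorted keys; state = (prev, run, answer)
def runStep (st : Option Int × Int × Int) (k : Int) : Option Int × Int × Int :=
  match st with
  | (some p, r, ans) => if k = p then (some p, r + 1, ans) else (some k, 1, ans + pairF r)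
  | (none, r, ans) => (some k, 1, ans + pairF r)

def solution_alt (N : Int) (K : Int) (arr : List Int) : Int :=
  let keys := (arr.foldl (fun (st : Int × List Int) a =>
      let t := st.1 + (a - K); (t, st.2 ++ [t])) (0, ([0] : List Int))).2
  let sk := PySem.List.sorted keys (fun x => x) false
  let fin := sk.foldl runStep (none, 0, 0)
  fin.2.2 + pairF fin.2.1

-- ===== PRECONDITION & SPEC =====
def Spec_solution (N : Int) (K : Int) (arr : List Int) (out : Int) : Prop := out = solution_alt N K arr
instance (N : Int) (K : Int) (arr : List Int) (out : Int) : Decidable (Spec_solution N K arr out) := by unfold Spec_solution; infer_instance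

-- ===== CLAIM (what is proved, stated in full; the proofs are below) =====
def Claim_equal_solution : Prop := ∀ (N : Int) (K : Int) (arr : List Int), Dom_solution N K arr → Spec_solution N K arr (solution N K arr)

-- ===== LEMMAS AND PROOFS =====

-- the sequence of keys produced after the initial 0: running t = prefix sum of (a - K)
def kseq (K t : Int) : List Int → List Int
  | [] => []
  | a :: l => (t + (a - K)) :: kseq K (t + (a - K)) l

-- tail of the prefix-sum list from running sum s
def scanTail (s : Int) : List Int → List Int
  | [] => []
  | a :: l => (s + a) :: scanTail (s + a) l

-- value of A's streaming loop, as a sum over the distinct keys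
def pairT (ks : List Int) : Int :=
  ((PySem.Set.ofList ks).map (fun j => pairF (ks.count j))).sum

-- value of B's run scan, as a Finset sum over the distinct keys
def pairS (ks : List Int) : Int := ∑ j ∈ ks.toFinset, pairF ((ks.count j : Int))

theorem pairF_succ (c : Int) : pairF (c + 1) = pairF c + c := by
  unfold pairF
  rw [PySem.Int.floordiv_eq_ediv_of_pos (by omega), PySem.Int.floordiv_eq_ediv_of_pos (by omega)]
  have h : (c + 1) * (c + 1 - 1) = c * (c - 1) + 2 * c := by ring
  rw [h]
  omega

theorem pairF_one : pairF 1 = 0 := by decide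

theorem prefs_eq (arr : List Int) (ps : List Int) (x : Int) :
    (arr.foldl (fun ps Ai => ps ++ [PySem.List.pyGetD ps (-1) 0 + Ai]) (ps ++ [x])) =
      (ps ++ [x]) ++ scanTail x arr := by
  induction arr generalizing ps x with
  | nil => simp [scanTail]
  | cons a l ih =>
    simp only [List.foldl_cons, scanTail, PySem.List.pyGetD_neg_one_append_singleton]
    rw [ih (ps ++ [x]) (x + a)]
    simp

theorem keys_eq (K : Int) (arr : List Int) (s : Int) (i : Int) :
    (PySem.List.enumerate (scanTail s arr) (i + 1)).map (fun p => p.2 - K * p.1) =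
      kseq K (s - K * i) arr := by
  induction arr generalizing s i with
  | nil => simp [scanTail, kseq, PySem.List.enumerate_nil]
  | cons a l ih =>
    simp only [scanTail, kseq, PySem.List.enumerate_cons, List.map_cons]
    rw [ih (s + a) (i + 1)]
    have h1 : s + a - K * (i + 1) = s - K * i + (a - K) := by ring
    rw [h1]

theorem afold_fst (ks : List Int) (d : PySem.Dict Int Int) (a : Int) :
    (ks.foldl (fun (st : PySem.Dict Int Int × Int) k =>
        (st.1.modify k 0 (· + 1), st.2 + st.1.getD k 0)) (d, a)).1 =
      ks.foldl (fun d k => d.modify k 0 (· + 1)) d := by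
  induction ks generalizing d a with
  | nil => rfl
  | cons k l ih => simp only [List.foldl_cons]; exact ih _ _

theorem sum_map_update (S : List Int) (g g' : Int → Int) (k d : Int)
    (hnd : S.Nodup) (hk : k ∈ S) (hoff : ∀ j ∈ S, j ≠ k → g' j = g j)
    (hat : g' k = g k + d) :
    (S.map g').sum = (S.map g).sum + d := by
  induction S with
  | nil => cases hk
  | cons x S ih =>
    rcases List.mem_cons.mp hk with h | h
    · subst h
      have hS : ∀ j ∈ S, g' j = g j := fun j hj =>
        hoff j (List.mem_cons_of_mem _ hj)
          (by rintro rfl; exact (List.nodup_cons.mp hnd).1 hj)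
      simp only [List.map_cons, List.sum_cons, hat, List.map_congr_left hS]
      ring
    · have hx : x ≠ k := by rintro rfl; exact (List.nodup_cons.mp hnd).1 h
      simp only [List.map_cons, List.sum_cons,
        hoff x List.mem_cons_self hx,
        ih (List.nodup_cons.mp hnd).2 h
          (fun j hj hne => hoff j (List.mem_cons_of_mem _ hj) hne)]
      ring

theorem pairT_step (ks : List Int) (k : Int) : pairT (ks ++ [k]) = pairT ks + ks.count k := by
  unfold pairT
  rw [PySem.Set.ofList_append_singleton]
  by_cases hk : k ∈ ks
  · rw [PySem.Set.add_of_mem ((PySem.Set.mem_ofList ks k).mpr hk)]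
    apply sum_map_update _ _ _ k (ks.count k) (PySem.Set.nodup_ofList ks)
      ((PySem.Set.mem_ofList ks k).mpr hk)
    · intro j _ hne
      congr 1
      rw [List.count_append]
      simp [Ne.symm hne]
    · have h1 : (ks ++ [k]).count k = ks.count k + 1 := by
        rw [List.count_append]; simp
      rw [h1]; push_cast; rw [pairF_succ]
  · rw [PySem.Set.add_of_not_mem (by simp [PySem.Set.mem_ofList]; exact hk)]
    rw [List.map_append, List.sum_append]
    have hcnt : ∀ j ∈ PySem.Set.ofList ks,
        pairF ((ks ++ [k]).count j) = pairF (ks.count j) := by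
      intro j hj
      have hne : j ≠ k := fun h => hk (h ▸ (PySem.Set.mem_ofList ks j).mp hj)
      congr 1
      rw [List.count_append]
      simp [Ne.symm hne]
    rw [List.map_congr_left hcnt]
    have h0 : ks.count k = 0 := List.count_eq_zero.mpr hk
    simp [List.count_append, List.count_singleton, h0, pairF_one]

theorem stream_eq (ks : List Int) :
    (ks.foldl (fun (st : PySem.Dict Int Int × Int) k =>
        (st.1.modify k 0 (· + 1), st.2 + st.1.getD k 0)) (PySem.Dict.empty, 0)).2 =
      pairT ks := by
  induction ks using List.reverseRecOn with
  | nil => simp [pairT, PySem.Set.ofList_nil]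
  | append_singleton ks k ih =>
    rw [List.foldl_append]
    simp only [List.foldl_cons, List.foldl_nil]
    rw [afold_fst, ← PySem.Dict.counter_eq_foldl, ih,
      PySem.Dict.getD_counter, pairT_step]

theorem prefs_all (arr : List Int) :
    arr.foldl (fun ps Ai => ps ++ [PySem.List.pyGetD ps (-1) 0 + Ai]) [0] =
      0 :: scanTail 0 arr := by
  have := prefs_eq arr [] 0
  simpa using this

theorem keys_all (K : Int) (arr : List Int) :
    (PySem.List.enumerate (arr.foldl (fun ps Ai => ps ++ [PySem.List.pyGetD ps (-1) 0 + Ai]) [0]) 0).map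
        (fun p => p.2 - K * p.1) =
      0 :: kseq K 0 arr := by
  rw [prefs_all arr, PySem.List.enumerate_cons, List.map_cons]
  rw [keys_eq K arr 0 0]
  norm_num

theorem foldl_key (K : Int) (ks : List (Int × Int)) (init : PySem.Dict Int Int × Int) :
    List.foldl (fun (st : PySem.Dict Int Int × Int) (p : Int × Int) =>
        (st.1.modify (p.2 - K * p.1) 0 (· + 1), st.2 + st.1.getD (p.2 - K * p.1) 0)) init ks =
      List.foldl (fun (st : PySem.Dict Int Int × Int) (k : Int) =>
        (st.1.modify k 0 (· + 1), st.2 + st.1.getD k 0)) init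
        (ks.map (fun p => p.2 - K * p.1)) := by
  induction ks generalizing init with
  | nil => rfl
  | cons p l ih => simp only [List.foldl_cons, List.map_cons]; exact ih _

-- B's keys list is 0 :: kseq K 0 arr
theorem keysB_eq (K : Int) (arr : List Int) (t : Int) (l : List Int) :
    (arr.foldl (fun (st : Int × List Int) a =>
        (st.1 + (a - K), st.2 ++ [st.1 + (a - K)])) (t, l)).2 = l ++ kseq K t arr := by
  induction arr generalizing t l with
  | nil => simp [kseq]
  | cons a l' ih => simp only [List.foldl_cons, kseq]; rw [ih]; simp

-- pairT = pairS (sum over the nodup list of distinct elements = Finset sum)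
theorem nodup_map_sum (d : List Int) (f : Int → Int) (h : d.Nodup) :
    (d.map f).sum = ∑ j ∈ d.toFinset, f j := by
  induction d with
  | nil => simp
  | cons a d ih =>
    rcases List.nodup_cons.mp h with ⟨ha, hd⟩
    have ha' : a ∉ d.toFinset := by simpa using ha
    rw [List.map_cons, List.sum_cons, List.toFinset_cons, Finset.sum_insert ha', ih hd]

theorem pairT_eq_pairS (ks : List Int) : pairT ks = pairS ks := by
  unfold pairT pairS
  rw [nodup_map_sum _ _ (PySem.Set.nodup_ofList ks)]
  apply Finset.sum_congr
  · ext j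
    simp [List.mem_toFinset, PySem.Set.mem_ofList]
  · intro j _; rfl

theorem pairS_perm (l l' : List Int) (h : l.Perm l') : pairS l = pairS l' := by
  unfold pairS
  rw [List.toFinset_eq_of_perm l l' h]
  exact Finset.sum_congr rfl (fun j _ => by rw [h.count_eq])

theorem pairS_nil : pairS [] = 0 := by simp [pairS]

theorem pairS_cons (k : Int) (t : List Int) :
    pairS (k :: t) = pairF (t.count k + 1) + pairS (t.filter (fun x => x ≠ k)) := by
  unfold pairS
  rw [List.toFinset_cons,
    ← Finset.add_sum_erase _ _ (Finset.mem_insert_self k t.toFinset),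
    Finset.erase_insert_eq_erase]
  congr 1
  · simp
  · rw [List.toFinset_filter]
    have he : t.toFinset.filter (fun x => decide (x ≠ k)) = t.toFinset.erase k := by
      ext j; simp [Finset.mem_erase, and_comm]
    rw [he]
    apply Finset.sum_congr rfl
    intro j hj
    rcases Finset.mem_erase.mp hj with ⟨hne, _⟩
    congr 1
    simp [List.count_filter, hne, Ne.symm hne]

-- the run-length scan on a sorted tail, with p strictly below every element already a non-issue:
-- invariant over B's scan loop
theorem run_inv (l : List Int) (p r acc : Int)
    (hs : l.Pairwise (· ≤ ·)) (hp : ∀ x ∈ l, p ≤ x) :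
    (l.foldl runStep (some p, r, acc)).2.2 + pairF (l.foldl runStep (some p, r, acc)).2.1 =
      acc + pairF (r + l.count p) + pairS (l.filter (fun x => x ≠ p)) := by
  induction l generalizing p r acc with
  | nil => simp [pairS_nil]
  | cons k t ih =>
    rcases List.pairwise_cons.mp hs with ⟨hk, ht⟩
    by_cases hkp : k = p
    · subst hkp
      simp only [List.foldl_cons, runStep, reduceIte]
      rw [ih k (r + 1) acc ht hk]
      rw [List.count_cons_self, List.filter_cons]
      simp only [ne_eq, not_true_eq_false, decide_false]
      push_cast
      ring_nf
    · have hpk : p < k := lt_of_le_of_ne (hp k List.mem_cons_self) (fun h => hkp h.symm)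
      have hnotp : ∀ x ∈ k :: t, x ≠ p := by
        intro x hx
        rcases List.mem_cons.mp hx with h | h
        · subst h; exact Ne.symm (ne_of_lt hpk)
        · exact fun he => absurd (he ▸ hk x h) (not_le.mpr hpk)
      simp only [List.foldl_cons, runStep, if_neg hkp]
      rw [ih k 1 (acc + pairF r) ht hk]
      have hc0 : (k :: t).count p = 0 :=
        List.count_eq_zero.mpr (fun h => hnotp p h rfl)
      have hfp : (k :: t).filter (fun x => x ≠ p) = k :: t := by
        apply List.filter_eq_self.mpr
        intro x hx; simpa using hnotp x hx
      rw [hc0, hfp, pairS_cons]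
      have h1 : (1 : Int) + (t.count k : Int) = (t.count k : Int) + 1 := by ring
      rw [h1]
      push_cast
      ring_nf

theorem run_total (l : List Int) (hs : l.Pairwise (· ≤ ·)) :
    (l.foldl runStep (none, 0, 0)).2.2 + pairF (l.foldl runStep (none, 0, 0)).2.1 = pairS l := by
  cases l with
  | nil => rw [pairS_nil]; decide
  | cons k t =>
    rcases List.pairwise_cons.mp hs with ⟨hk, ht⟩
    simp only [List.foldl_cons, runStep]
    have h0 : (0 : Int) + pairF 0 = 0 := by decide
    rw [h0, run_inv t k 1 0 ht hk, pairS_cons]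
    have h1 : (1 : Int) + (t.count k : Int) = (t.count k : Int) + 1 := by ring
    rw [h1]
    ring

-- ===== VERDICT (by name: the statement is the Claim_ definition above) =====
theorem solution_spec : Claim_equal_solution := by
  intro N K arr _
  unfold Spec_solution solution solution_alt
  show (List.foldl
      (fun (st : PySem.Dict Int Int × Int) (p : Int × Int) =>
        (st.1.modify (p.2 - K * p.1) 0 (· + 1), st.2 + st.1.getD (p.2 - K * p.1) 0))
      (PySem.Dict.empty, 0)
      (PySem.List.enumerate
        (arr.foldl (fun ps Ai => ps ++ [PySem.List.pyGetD ps (-1) 0 + Ai]) [0]) 0)).2 = _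
  rw [foldl_key K, keys_all K arr, stream_eq, pairT_eq_pairS]
  rw [keysB_eq K arr 0 [0]]
  have hperm : (PySem.List.sorted ((0 : Int) :: kseq K 0 arr) (fun x => x) false).Perm
      ((0 : Int) :: kseq K 0 arr) := PySem.List.sorted_perm _ _ _
  rw [run_total _ (by simpa using PySem.List.sorted_pairwise ((0 : Int) :: kseq K 0 arr) (fun x => x))]
  exact pairS_perm _ _ hperm.symm
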